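-- pv_equiv track=rewrite | github.com/Liljedahladvisory/doccompare | src/doccompare/comparison/differ.py | _lcs_token_ops
-- ===== SOURCE A (Python) =====
-- def _lcs_token_ops(a: list, b: list) -> list:
--     """LCS diff on token lists. Returns [(op, token)] where op is -1/0/1."""
--     n, m = len(a), len(b)
--     # Cap to avoid O(n²) slowdown on very long paragraphs
--     if n * m > 40000:
--         return [(-1, t) for t in a] + [(1, t) for t in b]
--     dp = [[0] * (m + 1) for _ in range(n + 1)]
--     for i in range(1, n + 1):
--         for j in range(1, m + 1):
--             if a[i - 1] == b[j - 1]: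
--                 dp[i][j] = dp[i - 1][j - 1] + 1
--             else:
--                 dp[i][j] = max(dp[i - 1][j], dp[i][j - 1])
--     ops = []
--     i, j = n, m
--     while i > 0 or j > 0:
--         if i > 0 and j > 0 and a[i - 1] == b[j - 1]:
--             ops.append((0, a[i - 1]))
--             i -= 1; j -= 1
--         elif j > 0 and (i == 0 or dp[i][j - 1] >= dp[i - 1][j]):
--             ops.append((1, b[j - 1]))
--             j -= 1
--         else:
--             ops.append((-1, a[i - 1]))
--             i -= 1
--     ops.reverse()
--     return ops
-- ===== SOURCE B (Python) =====
-- def _lcs_token_ops(a: list, b: list) -> list: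
--     """LCS diff on token lists. Returns [(op, token)] where op is -1/0/1.
--
--     Forward DP over (lcs_count, script) pairs with a rolling row: each cell
--     holds the finished edit script for the corresponding prefixes, so no
--     backtracking pass and no full n*m table is needed.
--     """
--     n, m = len(a), len(b)
--     if n * m > 40000:
--         return [(-1, t) for t in a] + [(1, t) for t in b]
--     row = [(0, [])]
--     for j in range(1, m + 1):
--         row.append((0, row[j - 1][1] + [(1, b[j - 1])]))
--     for i in range(1, n + 1):
--         new = [(0, row[0][1] + [(-1, a[i - 1])])]
--         for j in range(1, m + 1):
--             if a[i - 1] == b[j - 1]: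
--                 c, s = row[j - 1]
--                 new.append((c + 1, s + [(0, a[i - 1])]))
--             elif new[j - 1][0] >= row[j][0]:
--                 c, s = new[j - 1]
--                 new.append((c, s + [(1, b[j - 1])]))
--             else:
--                 c, s = row[j]
--                 new.append((c, s + [(-1, a[i - 1])]))
--         row = new
--     return row[m][1]
-- ===== Notes on version B (the rewrite author's own statement) =====
-- stated objective: alternative
-- what changed: B replaces A's integer dp table plus backward reconstruction-and-reverse by a forward DP that stores (lcs count, finished edit script) pairs in a single rolling row and simply returns the last cell's script, with the same >= tie-break and size cap.
import Mathlib
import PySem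

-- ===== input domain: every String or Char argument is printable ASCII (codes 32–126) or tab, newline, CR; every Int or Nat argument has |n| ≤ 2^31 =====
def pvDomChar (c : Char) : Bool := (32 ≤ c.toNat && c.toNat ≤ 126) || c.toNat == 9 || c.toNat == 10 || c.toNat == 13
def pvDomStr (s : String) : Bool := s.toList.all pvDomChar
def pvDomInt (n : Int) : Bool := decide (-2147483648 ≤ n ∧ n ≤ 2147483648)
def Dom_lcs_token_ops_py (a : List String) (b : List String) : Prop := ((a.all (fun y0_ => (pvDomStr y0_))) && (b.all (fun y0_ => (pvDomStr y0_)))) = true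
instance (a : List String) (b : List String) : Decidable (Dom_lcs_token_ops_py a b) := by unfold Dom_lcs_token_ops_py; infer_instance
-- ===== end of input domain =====

-- B replaces A's int table + backward reconstruction + reverse by a forward DP over
-- (lcs_count, finished script) pairs kept in one rolling row (objective: alternative).

-- ===== PORT A =====
-- dp[i][j] lookup / assignment; all indices produced by A's loops are in range,
-- so the getD default is never returned (exact transliteration of list indexing).
def pvGet2 (dp : List (List Int)) (i j : Nat) : Int := (dp.getD i []).getD j 0

def pvSet2 (dp : List (List Int)) (i j : Nat) (v : Int) : List (List Int) :=
  dp.set i ((dp.getD i []).set j v)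

-- the nested `for i in range(1,n+1): for j in range(1,m+1)` filling dp
def pvDpA (a b : List String) (n m : Nat) : List (List Int) :=
  (List.range n).foldl (fun dp i' =>
      (List.range m).foldl (fun dp j' =>
          let i := i' + 1
          let j := j' + 1
          if a.getD (i - 1) "" = b.getD (j - 1) "" then
            pvSet2 dp i j (pvGet2 dp (i - 1) (j - 1) + 1)
          else
            pvSet2 dp i j (max (pvGet2 dp (i - 1) j) (pvGet2 dp i (j - 1))))
        dp)
    (List.replicate (n + 1) (List.replicate (m + 1) (0 : Int)))

-- the `while i > 0 or j > 0` backtracking loop, ops appended at the end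
def pvBack (a b : List String) (dp : List (List Int)) :
    Nat → Nat → List (Int × String) → List (Int × String)
  | i, j, ops =>
    if _h0 : i = 0 ∧ j = 0 then ops
    else if _h1 : i ≠ 0 ∧ j ≠ 0 ∧ a.getD (i - 1) "" = b.getD (j - 1) "" then
      pvBack a b dp (i - 1) (j - 1) (ops ++ [((0 : Int), a.getD (i - 1) "")])
    else if h2 : j ≠ 0 ∧ (i = 0 ∨ pvGet2 dp i (j - 1) ≥ pvGet2 dp (i - 1) j) then
      pvBack a b dp i (j - 1) (ops ++ [((1 : Int), b.getD (j - 1) "")])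
    else
      pvBack a b dp (i - 1) j (ops ++ [((-1 : Int), a.getD (i - 1) "")])
  termination_by i j _ => i + j
  decreasing_by
  · omega
  · omega
  · -- here i ≠ 0: otherwise h2 would hold (j ≠ 0 from ¬h0, and i = 0 gives the disjunct)
    by_cases hi : i = 0
    · exact absurd ⟨by omega, Or.inl hi⟩ h2
    · omega

def lcs_token_ops_py (a : List String) (b : List String) : List (Int × String) :=
  let n := a.length
  let m := b.length
  if n * m > 40000 then
    a.map (fun t => ((-1 : Int), t)) ++ b.map (fun t => ((1 : Int), t))
  else
    let dp := pvDpA a b n m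
    (pvBack a b dp n m []).reverse

-- ===== PORT B =====
-- row 0: `row = [(0, [])]; for j in range(1, m+1): row.append(...)`
def pvRow0 (b : List String) (m : Nat) : List (Int × List (Int × String)) :=
  (List.range m).foldl (fun row j' =>
      let j := j' + 1
      row ++ [((0 : Int), (row.getD (j - 1) (0, [])).2 ++ [((1 : Int), b.getD (j - 1) "")])])
    [((0 : Int), ([] : List (Int × String)))]

-- one outer iteration: build row i from row i-1
def pvRowStep (a b : List String) (m i : Nat) (row : List (Int × List (Int × String))) :
    List (Int × List (Int × String)) :=
  (List.range m).foldl (fun new j' =>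
      let j := j' + 1
      if a.getD (i - 1) "" = b.getD (j - 1) "" then
        let p := row.getD (j - 1) (0, [])
        new ++ [(p.1 + 1, p.2 ++ [((0 : Int), a.getD (i - 1) "")])]
      else if (new.getD (j - 1) (0, [])).1 ≥ (row.getD j (0, [])).1 then
        let p := new.getD (j - 1) (0, [])
        new ++ [(p.1, p.2 ++ [((1 : Int), b.getD (j - 1) "")])]
      else
        let p := row.getD j (0, [])
        new ++ [(p.1, p.2 ++ [((-1 : Int), a.getD (i - 1) "")])])
    [((0 : Int), (row.getD 0 (0, [])).2 ++ [((-1 : Int), a.getD (i - 1) "")])]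

def lcs_token_ops_py_alt (a : List String) (b : List String) : List (Int × String) :=
  let n := a.length
  let m := b.length
  if n * m > 40000 then
    a.map (fun t => ((-1 : Int), t)) ++ b.map (fun t => ((1 : Int), t))
  else
    let row := (List.range n).foldl (fun row i' => pvRowStep a b m (i' + 1) row) (pvRow0 b m)
    (row.getD m (0, [])).2

-- ===== PRECONDITION & SPEC =====
def Spec_lcs_token_ops_py (a : List String) (b : List String) (out : List (Int × String)) : Prop := out = lcs_token_ops_py_alt a b
instance (a : List String) (b : List String) (out : List (Int × String)) : Decidable (Spec_lcs_token_ops_py a b out) := by unfold Spec_lcs_token_ops_py; infer_instance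

-- ===== CLAIM (what is proved, stated in full; the proofs are below) =====
def Claim_equal_lcs_token_ops_py : Prop := ∀ (a : List String) (b : List String), Dom_lcs_token_ops_py a b → Spec_lcs_token_ops_py a b (lcs_token_ops_py a b)

-- ===== LEMMAS AND PROOFS =====

-- the common mathematical recurrence: (lcs count, edit script) for prefixes of length i, j
def pvSS (a b : List String) : Nat → Nat → Int × List (Int × String)
  | 0, 0 => (0, [])
  | 0, j + 1 =>
    let p := pvSS a b 0 j
    (0, p.2 ++ [((1 : Int), b.getD j "")])
  | i + 1, 0 =>
    let p := pvSS a b i 0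
    (0, p.2 ++ [((-1 : Int), a.getD i "")])
  | i + 1, j + 1 =>
    if a.getD i "" = b.getD j "" then
      let p := pvSS a b i j
      (p.1 + 1, p.2 ++ [((0 : Int), a.getD i "")])
    else if (pvSS a b (i + 1) j).1 ≥ (pvSS a b i (j + 1)).1 then
      let p := pvSS a b (i + 1) j
      (p.1, p.2 ++ [((1 : Int), b.getD j "")])
    else
      let p := pvSS a b i (j + 1)
      (p.1, p.2 ++ [((-1 : Int), a.getD i "")])
  termination_by i j => i + j

-- generic loop-invariant lemma for foldl over List.range
theorem foldl_range_inv {α : Type} (m : Nat) (f : α → Nat → α) (P : Nat → α → Prop)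
    (init : α) (h0 : P 0 init) (hs : ∀ k x, k < m → P k x → P (k + 1) (f x k)) :
    P m ((List.range m).foldl f init) := by
  induction m with
  | zero => simpa using h0
  | succ m ih =>
    rw [List.range_succ, List.foldl_append]
    exact hs m _ (Nat.lt_succ_self m) (ih (fun k x hk => hs k x (Nat.lt_succ_of_lt hk)))

theorem map_range_getD {α : Type} (k t : Nat) (f : Nat → α) (d : α) (h : t < k) :
    ((List.range k).map f).getD t d = f t := by
  rw [List.getD_eq_getElem?_getD]
  simp [h]

theorem ss_fst_zero_left (a b : List String) (j : Nat) : (pvSS a b 0 j).1 = 0 := by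
  cases j <;> simp [pvSS]

theorem ss_fst_zero_right (a b : List String) (i : Nat) : (pvSS a b i 0).1 = 0 := by
  cases i <;> simp [pvSS]

-- ---- A side: dp table values equal (pvSS · ·).1 ----

def pvDpOk (a b : List String) (n m : Nat) (dp : List (List Int)) : Prop :=
  ∀ i j, i ≤ n → j ≤ m → pvGet2 dp i j = (pvSS a b i j).1

theorem getD_set_self {α : Type} (l : List α) (i : Nat) (v d : α) (h : i < l.length) :
    (l.set i v).getD i d = v := by
  simp [List.getD_eq_getElem?_getD, h]

theorem getD_set_ne {α : Type} (l : List α) (i i' : Nat) (v d : α) (h : i ≠ i') :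
    (l.set i v).getD i' d = l.getD i' d := by
  simp [List.getD_eq_getElem?_getD, h]

theorem getD_replicate {α : Type} (k i : Nat) (x d : α) (h : i < k) :
    (List.replicate k x).getD i d = x := by
  simp [List.getD_eq_getElem?_getD, h]

theorem pvGet2_eq (dp : List (List Int)) (i j : Nat) :
    pvGet2 dp i j = (dp.getD i []).getD j 0 := rfl

theorem ss_fst_succ (a b : List String) (i j : Nat) :
    (pvSS a b (i + 1) (j + 1)).1 =
      if a.getD i "" = b.getD j "" then (pvSS a b i j).1 + 1
      else max (pvSS a b i (j + 1)).1 (pvSS a b (i + 1) j).1 := by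
  rw [pvSS]
  by_cases h1 : a.getD i "" = b.getD j ""
  · rw [if_pos h1, if_pos h1]
  · rw [if_neg h1, if_neg h1]
    by_cases h2 : (pvSS a b (i + 1) j).1 ≥ (pvSS a b i (j + 1)).1
    · rw [if_pos h2]
      exact (max_eq_right h2).symm
    · rw [if_neg h2]
      exact (max_eq_left (le_of_not_ge h2)).symm

theorem dpA_ok (a b : List String) (n m : Nat) :
    pvDpOk a b n m (pvDpA a b n m) := by
  have H := foldl_range_inv (α := List (List Int)) n
    (fun dp i' =>
      (List.range m).foldl (fun dp j' =>
          let i := i' + 1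
          let j := j' + 1
          if a.getD (i - 1) "" = b.getD (j - 1) "" then
            pvSet2 dp i j (pvGet2 dp (i - 1) (j - 1) + 1)
          else
            pvSet2 dp i j (max (pvGet2 dp (i - 1) j) (pvGet2 dp i (j - 1))))
        dp)
    (fun k dp =>
      dp.length = n + 1 ∧
      (∀ i, i ≤ n → (dp.getD i []).length = m + 1) ∧
      (∀ i j, i ≤ k → j ≤ m → pvGet2 dp i j = (pvSS a b i j).1) ∧
      (∀ i, k < i → i ≤ n → dp.getD i [] = List.replicate (m + 1) (0 : Int)))
    (List.replicate (n + 1) (List.replicate (m + 1) (0 : Int))) ?_ ?_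
  · intro i j hi hj
    exact (H.2.2.1) i j hi hj
  · refine ⟨by simp, ?_, ?_, ?_⟩
    · intro i hi; rw [getD_replicate _ _ _ _ (by omega)]; simp
    · intro i j hi hj
      have hi0 : i = 0 := by omega
      subst hi0
      unfold pvGet2
      rw [getD_replicate _ _ _ _ (by omega), getD_replicate _ _ _ _ (by omega),
        ss_fst_zero_left]
    · intro i hik hin
      rw [getD_replicate _ _ _ _ (by omega)]
  · intro k dp hk hP
    beta_reduce
    obtain ⟨hlen, hrlen, hval, hzero⟩ := hP
    have Hin := foldl_range_inv (α := List (List Int)) m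
      (fun dp' j' =>
          let i := k + 1
          let j := j' + 1
          if a.getD (i - 1) "" = b.getD (j - 1) "" then
            pvSet2 dp' i j (pvGet2 dp' (i - 1) (j - 1) + 1)
          else
            pvSet2 dp' i j (max (pvGet2 dp' (i - 1) j) (pvGet2 dp' i (j - 1))))
      (fun t dp' =>
        dp'.length = n + 1 ∧
        (∀ i', i' ≠ k + 1 → dp'.getD i' [] = dp.getD i' []) ∧
        (dp'.getD (k + 1) []).length = m + 1 ∧
        (∀ j', j' ≤ t → pvGet2 dp' (k + 1) j' = (pvSS a b (k + 1) j').1) ∧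
        (∀ j', t < j' → j' ≤ m → pvGet2 dp' (k + 1) j' = 0))
      dp ?_ ?_
    · obtain ⟨ilen, iother, irlen, ival, _⟩ := Hin
      refine ⟨ilen, ?_, ?_, ?_⟩
      · intro i hi
        by_cases hik : i = k + 1
        · subst hik; exact irlen
        · rw [iother i hik]; exact hrlen i hi
      · intro i j hi hj
        by_cases hik : i = k + 1
        · subst hik; exact ival j hj
        · have : i ≤ k := by omega
          rw [pvGet2_eq, iother i hik]
          exact hval i j this hj
      · intro i hki hin
        rw [iother i (by omega)]
        exact hzero i (by omega) hin
    · refine ⟨hlen, fun _ _ => rfl, hrlen (k + 1) (by omega), ?_, ?_⟩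
      · intro j' hj'
        have hj0 : j' = 0 := by omega
        subst hj0
        unfold pvGet2
        rw [hzero (k + 1) (by omega) (by omega), getD_replicate _ _ _ _ (by omega),
          ss_fst_zero_right]
      · intro j' h0j hjm
        unfold pvGet2
        rw [hzero (k + 1) (by omega) (by omega), getD_replicate _ _ _ _ (by omega)]
    · intro t dp' ht hQ
      beta_reduce
      obtain ⟨ilen, iother, irlen, ival, izero⟩ := hQ
      simp only [Nat.add_sub_cancel]
      -- the updated value is correct
      have hrowk : ∀ j', j' ≤ m → pvGet2 dp' k j' = (pvSS a b k j').1 := by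
        intro j' hj'
        unfold pvGet2
        rw [iother k (by omega)]
        exact hval k j' le_rfl hj'
      have hv : (if a.getD k "" = b.getD t "" then pvGet2 dp' k t + 1
          else max (pvGet2 dp' k (t + 1)) (pvGet2 dp' (k + 1) t)) =
          (pvSS a b (k + 1) (t + 1)).1 := by
        rw [ss_fst_succ]
        by_cases he : a.getD k "" = b.getD t ""
        · rw [if_pos he, if_pos he, hrowk t (by omega)]
        · rw [if_neg he, if_neg he, hrowk (t + 1) (by omega), ival t le_rfl]
      -- facts about the set
      have hklt : k + 1 < dp'.length := by omega
      have htlt : t + 1 < (dp'.getD (k + 1) []).length := by omega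
      constructor
      · -- length preserved
        split_ifs <;> simp [pvSet2, ilen]
      constructor
      · intro i' hi'
        split_ifs <;>
          · unfold pvSet2
            rw [getD_set_ne _ _ _ _ _ (by omega)]
            exact iother i' hi'
      constructor
      · split_ifs <;>
          · unfold pvSet2
            rw [getD_set_self _ _ _ _ hklt, List.length_set]
            exact irlen
      constructor
      · intro j' hj'
        by_cases hjt : j' = t + 1
        · subst hjt
          split_ifs with he
          · unfold pvGet2 pvSet2
            rw [getD_set_self _ _ _ _ hklt, getD_set_self _ _ _ _ htlt, ← hv, if_pos he]
            rfl
          · unfold pvGet2 pvSet2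
            rw [getD_set_self _ _ _ _ hklt, getD_set_self _ _ _ _ htlt, ← hv, if_neg he]
            rfl
        · have hjle : j' ≤ t := by omega
          have base : pvGet2 dp' (k + 1) j' = (pvSS a b (k + 1) j').1 := ival j' hjle
          split_ifs <;>
            · unfold pvGet2 pvSet2
              rw [getD_set_self _ _ _ _ hklt, getD_set_ne _ _ _ _ _ (by omega)]
              exact base
      · intro j' h0j hjm
        have base : pvGet2 dp' (k + 1) j' = 0 := izero j' (by omega) hjm
        split_ifs <;>
          · unfold pvGet2 pvSet2
            rw [getD_set_self _ _ _ _ hklt, getD_set_ne _ _ _ _ _ (by omega)]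
            exact base

-- ---- A side: backtracking reconstructs the reversed script ----

theorem back_eq (a b : List String) (n m : Nat) (dp : List (List Int))
    (hdp : pvDpOk a b n m dp) :
    ∀ i j (acc : List (Int × String)), i ≤ n → j ≤ m →
      pvBack a b dp i j acc = acc ++ ((pvSS a b i j).2).reverse := by
  suffices H : ∀ N i j (acc : List (Int × String)), i + j ≤ N → i ≤ n → j ≤ m →
      pvBack a b dp i j acc = acc ++ ((pvSS a b i j).2).reverse by
    intro i j acc hi hj
    exact H (i + j) i j acc le_rfl hi hj
  intro N
  induction N with
  | zero =>
    intro i j acc h hi hj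
    have hi0 : i = 0 := by omega
    have hj0 : j = 0 := by omega
    subst hi0; subst hj0
    rw [pvBack, dif_pos ⟨rfl, rfl⟩]
    simp [pvSS]
  | succ N ih =>
    intro i j acc h hi hj
    match i, j, hi, hj, h with
    | 0, 0, _, _, _ =>
      rw [pvBack, dif_pos ⟨rfl, rfl⟩]
      simp [pvSS]
    | 0, j + 1, hi, hj, h =>
      rw [pvBack, dif_neg (by omega), dif_neg (by simp),
        dif_pos ⟨by omega, Or.inl rfl⟩]
      simp only [Nat.add_sub_cancel]
      rw [ih 0 j _ (by omega) (by omega) (by omega)]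
      have hs : pvSS a b 0 (j + 1) = (0, (pvSS a b 0 j).2 ++ [((1 : Int), b.getD j "")]) := by
        rw [pvSS]
      rw [hs]
      simp
    | i + 1, 0, hi, hj, h =>
      rw [pvBack, dif_neg (by omega), dif_neg (by simp), dif_neg (by simp)]
      simp only [Nat.add_sub_cancel]
      rw [ih i 0 _ (by omega) (by omega) (by omega)]
      have hs : pvSS a b (i + 1) 0 = (0, (pvSS a b i 0).2 ++ [((-1 : Int), a.getD i "")]) := by
        rw [pvSS]
      rw [hs]
      simp
    | i + 1, j + 1, hi, hj, h =>
      rw [pvBack, dif_neg (by omega)]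
      simp only [Nat.add_sub_cancel]
      by_cases he : a.getD i "" = b.getD j ""
      · rw [dif_pos ⟨by omega, by omega, he⟩]
        rw [ih i j _ (by omega) (by omega) (by omega)]
        have hs : pvSS a b (i + 1) (j + 1) =
            ((pvSS a b i j).1 + 1, (pvSS a b i j).2 ++ [((0 : Int), a.getD i "")]) := by
          rw [pvSS, if_pos he]
        rw [hs]
        simp
      · have e1 : pvGet2 dp (i + 1) j = (pvSS a b (i + 1) j).1 := hdp (i + 1) j hi (by omega)
        have e2 : pvGet2 dp i (j + 1) = (pvSS a b i (j + 1)).1 := hdp i (j + 1) (by omega) hj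
        rw [dif_neg (fun hh => he hh.2.2)]
        by_cases hge : (pvSS a b (i + 1) j).1 ≥ (pvSS a b i (j + 1)).1
        · rw [dif_pos ⟨by omega, Or.inr (by rw [e1, e2]; exact hge)⟩]
          rw [ih (i + 1) j _ (by omega) hi (by omega)]
          have hs : pvSS a b (i + 1) (j + 1) =
              ((pvSS a b (i + 1) j).1, (pvSS a b (i + 1) j).2 ++ [((1 : Int), b.getD j "")]) := by
            rw [pvSS, if_neg he, if_pos hge]
          rw [hs]
          simp
        · rw [dif_neg (by
            rintro ⟨-, hor⟩
            rcases hor with h0 | hge'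
            · omega
            · rw [e1, e2] at hge'
              exact hge hge')]
          rw [ih i (j + 1) _ (by omega) (by omega) hj]
          have hs : pvSS a b (i + 1) (j + 1) =
              ((pvSS a b i (j + 1)).1, (pvSS a b i (j + 1)).2 ++ [((-1 : Int), a.getD i "")]) := by
            rw [pvSS, if_neg he, if_neg hge]
          rw [hs]
          simp

-- ---- B side: the rolling row is the row of pvSS ----

theorem row0_eq (a b : List String) (m : Nat) :
    pvRow0 b m = (List.range (m + 1)).map (fun j => pvSS a b 0 j) := by
  unfold pvRow0
  refine foldl_range_inv m _ (fun k row => row = (List.range (k + 1)).map (fun j => pvSS a b 0 j)) _ ?_ ?_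
  · simp [List.range_succ, pvSS]
  · intro k row hk hrow
    subst hrow
    simp only []
    rw [map_range_getD (k + 1) (k + 1 - 1) _ _ (by omega)]
    rw [List.range_succ (n := k + 1), List.map_append]
    congr 1
    simp only [Nat.add_sub_cancel]
    have : pvSS a b 0 (k + 1) = (0, (pvSS a b 0 k).2 ++ [((1 : Int), b.getD k "")]) := by
      simp [pvSS]
    simp [this]

theorem rowStep_eq (a b : List String) (m i : Nat) :
    pvRowStep a b m (i + 1) ((List.range (m + 1)).map (fun j => pvSS a b i j)) =
      (List.range (m + 1)).map (fun j => pvSS a b (i + 1) j) := by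
  unfold pvRowStep
  refine foldl_range_inv m _
    (fun k new => new = (List.range (k + 1)).map (fun j => pvSS a b (i + 1) j)) _ ?_ ?_
  · rw [map_range_getD (m + 1) 0 _ _ (by omega)]
    have : pvSS a b (i + 1) 0 = (0, (pvSS a b i 0).2 ++ [((-1 : Int), a.getD i "")]) := by
      simp [pvSS]
    simp [List.range_succ, this]
  · intro k new hk hnew
    subst hnew
    simp only [Nat.add_sub_cancel]
    rw [map_range_getD (m + 1) k _ _ (by omega), map_range_getD (k + 1) k _ _ (by omega),
      map_range_getD (m + 1) (k + 1) _ _ (by omega)]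
    rw [List.range_succ (n := k + 1), List.map_append]
    have hss : pvSS a b (i + 1) (k + 1) =
        (if a.getD i "" = b.getD k "" then
          ((pvSS a b i k).1 + 1, (pvSS a b i k).2 ++ [((0 : Int), a.getD i "")])
        else if (pvSS a b (i + 1) k).1 ≥ (pvSS a b i (k + 1)).1 then
          ((pvSS a b (i + 1) k).1, (pvSS a b (i + 1) k).2 ++ [((1 : Int), b.getD k "")])
        else
          ((pvSS a b i (k + 1)).1, (pvSS a b i (k + 1)).2 ++ [((-1 : Int), a.getD i "")])) := by
      rw [pvSS]
    simp only [List.map_cons, List.map_nil]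
    rw [hss]
    split_ifs with h1 h2 <;> rfl

theorem rows_eq (a b : List String) (n m : Nat) :
    (List.range n).foldl (fun row i' => pvRowStep a b m (i' + 1) row) (pvRow0 b m) =
      (List.range (m + 1)).map (fun j => pvSS a b n j) := by
  refine foldl_range_inv n _
    (fun k row => row = (List.range (m + 1)).map (fun j => pvSS a b k j)) _ ?_ ?_
  · exact row0_eq a b m
  · intro k row hk hrow
    subst hrow
    exact rowStep_eq a b m k

-- ===== VERDICT (by name: the statement is the Claim_ definition above) =====
theorem lcs_token_ops_py_spec : Claim_equal_lcs_token_ops_py := by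
  intro a b _
  unfold Spec_lcs_token_ops_py lcs_token_ops_py lcs_token_ops_py_alt
  by_cases hc : a.length * b.length > 40000
  · simp [hc]
  · simp only [hc, if_false]
    rw [back_eq a b a.length b.length _ (dpA_ok a b a.length b.length) a.length b.length []
        le_rfl le_rfl,
      rows_eq, map_range_getD _ b.length _ _ (Nat.lt_succ_self _)]
    simp
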